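-- pv_equiv track=rewrite | github.com/chenyutcmn/leetcode_record | leetcode/2019.3/2019.3.17/4Sum.py | getsum2
-- ===== SOURCE A (Python) =====
-- def getsum2(nums, target):
--     resfor2 = []
--     for i in range(len(nums) - 1):
--         if (target - nums[i]) in nums[i + 1:]:
--             res = []
--             res.append(nums[i])
--             res.append(target - nums[i])
--             res.sort()
--             if res not in resfor2:
--                 resfor2.append(res)
--     return resfor2
-- ===== SOURCE B (Python) =====
-- def getsum2(nums, target):
--     # Characterization-based rewrite: a sorted pair [a, b] belongs to the output iff
--     # a + b == target and both endpoints occur in nums (with multiplicity 2 when a == b),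
--     # and the output order is the first-occurrence order of the pair's earlier endpoint.
--     # So: build a count map and a first-occurrence rank map once, then emit each
--     # qualifying pair at its earlier endpoint.  O(n) total, no per-index suffix scans
--     # and no dedup structure at all.
--     counts = {}
--     for v in nums:
--         counts[v] = counts.get(v, 0) + 1
--     order = {}
--     for i, v in enumerate(counts):
--         order[v] = i
--     out = []
--     for x in counts:
--         c = target - x
--         if c == x:
--             if counts[x] >= 2:
--                 out.append([x, x])
--         elif c in order and order[x] < order[c]:
--             out.append([x, c] if x < c else [c, x])
--     return out
-- ===== Notes on version B (the rewrite author's own statement) =====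
-- stated objective: faster
-- what changed: Replaces A's per-index suffix scans and result-list dedup with a global characterization: precompute a value-count map and a first-occurrence rank map, then emit each qualifying pair once at its earlier endpoint (pair qualifies iff both endpoints occur, twice when equal), which needs no dedup structure and no suffix membership tests.
import Mathlib
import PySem

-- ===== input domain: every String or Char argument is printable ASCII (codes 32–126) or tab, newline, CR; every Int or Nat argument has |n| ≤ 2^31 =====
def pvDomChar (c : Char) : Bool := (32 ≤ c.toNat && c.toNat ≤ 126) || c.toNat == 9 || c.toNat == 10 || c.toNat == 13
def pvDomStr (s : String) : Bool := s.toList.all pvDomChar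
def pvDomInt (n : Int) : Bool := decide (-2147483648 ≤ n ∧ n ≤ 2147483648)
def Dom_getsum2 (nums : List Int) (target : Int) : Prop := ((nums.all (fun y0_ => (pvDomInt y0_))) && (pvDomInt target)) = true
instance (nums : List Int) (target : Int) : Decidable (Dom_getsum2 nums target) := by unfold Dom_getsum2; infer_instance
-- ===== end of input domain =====

-- B replaces A's per-index suffix scans and result-list dedup by a global characterization
-- (count map + first-occurrence rank map, each pair emitted once at its earlier endpoint);
-- objective: faster (asymptotic).

-- ===== PORT A =====
-- loop body of A (indices from range(len(nums)-1) are in range, so pyGetD's default 0 is never used)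
def stepA (nums : List Int) (target : Int) (resfor2 : List (List Int)) (i : Int) : List (List Int) :=
  if (target - PySem.List.pyGetD nums i 0) ∈ PySem.List.slice nums (some (i + 1)) none then
    let res : List Int := []
    let res := res ++ [PySem.List.pyGetD nums i 0]
    let res := res ++ [target - PySem.List.pyGetD nums i 0]
    let res := PySem.List.sorted res (fun x => x) false
    if res ∈ resfor2 then resfor2 else resfor2 ++ [res]
  else resfor2

def getsum2 (nums : List Int) (target : Int) : List (List Int) :=
  (PySem.List.pyRange 0 (PySem.List.len nums - 1) 1).foldl (stepA nums target) []

-- ===== PORT B =====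
-- Source B step by step: `counts[x]` and `order[x]` are lookups of keys that are always
-- present (x ranges over counts' keys), so `getD _ 0` is exact there.
def getsum2_alt (nums : List Int) (target : Int) : List (List Int) :=
  let counts := nums.foldl (fun d v => d.insert v (d.getD v 0 + 1)) (PySem.Dict.empty : PySem.Dict Int Int)
  let order := (PySem.List.enumerate counts.keys 0).foldl
    (fun d (p : Int × Int) => d.insert p.2 p.1) PySem.Dict.empty
  counts.keys.foldl (fun out x =>
    let c := target - x
    if c == x then
      (if 2 ≤ counts.getD x 0 then out ++ [[x, x]] else out)
    else if order.contains c && decide (order.getD x 0 < order.getD c 0) then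
      out ++ [if x < c then [x, c] else [c, x]]
    else out) []

-- ===== PRECONDITION & SPEC =====
def Spec_getsum2 (nums : List Int) (target : Int) (out : List (List Int)) : Prop := out = getsum2_alt nums target
instance (nums : List Int) (target : Int) (out : List (List Int)) : Decidable (Spec_getsum2 nums target out) := by unfold Spec_getsum2; infer_instance

-- ===== CLAIM (what is proved, stated in full; the proofs are below) =====
def Claim_equal_getsum2 : Prop := ∀ (nums : List Int) (target : Int), Dom_getsum2 nums target → Spec_getsum2 nums target (getsum2 nums target)

-- ===== LEMMAS AND PROOFS =====

-- the pair contributed by a distinct value x: [x,x] if target = 2x and x occurs twice,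
-- [min x c, max x c] if the complement c occurs and x's first occurrence precedes c's
def pairOf (nums : List Int) (target : Int) (x : Int) : List (List Int) :=
  let c := target - x
  if c = x then (if 2 ≤ (nums.count x : Int) then [[x, x]] else [])
  else if c ∈ nums ∧ nums.idxOf x < nums.idxOf c then [[min x c, max x c]] else []

-- reference value after the first j indices have been processed
def refF (nums : List Int) (target : Int) (j : Nat) : List (List Int) :=
  (PySem.Set.ofList (nums.take j)).flatMap (pairOf nums target)

-- idxOf minimality: idxOf x ≤ any index holding x
lemma idxOf_le_of_getElem (l : List Int) (x : Int) (k : Nat) (h : k < l.length)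
    (he : l[k] = x) : l.idxOf x ≤ k := by
  by_contra hgt
  have hk : k < l.idxOf x := by omega
  simp [List.idxOf] at hk
  obtain ⟨_, hall⟩ := hk
  exact hall k le_rfl he

-- membership in a take-prefix is a bound on the first occurrence
lemma mem_take_iff_idxOf_lt (l : List Int) (x : Int) (n : Nat) (hx : x ∈ l) :
    x ∈ l.take n ↔ l.idxOf x < n := by
  constructor
  · intro h
    obtain ⟨k, hk, he⟩ := List.mem_take_iff_getElem.mp h
    have := idxOf_le_of_getElem l x k (by omega) he
    omega
  · intro h
    have hlt := List.idxOf_lt_length_of_mem hx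
    exact List.mem_take_iff_getElem.mpr ⟨l.idxOf x, by omega, List.getElem_idxOf hlt⟩

-- a fresh element at index j has idxOf = j
lemma idxOf_eq_of_not_mem_take (l : List Int) (x : Int) (j : Nat) (hj : j < l.length)
    (he : l[j] = x) (hx : x ∉ l.take j) : l.idxOf x = j := by
  have h1 := idxOf_le_of_getElem l x j hj he
  have hxl : x ∈ l := he ▸ List.getElem_mem hj
  have := (mem_take_iff_idxOf_lt l x j hxl).not.mp hx
  omega

-- membership in the suffix after a first occurrence
lemma mem_drop_of_idxOf_gt (l : List Int) (c : Int) (j : Nat) (hc : c ∈ l)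
    (hgt : j < l.idxOf c) : c ∈ l.drop (j + 1) := by
  have hlt := List.idxOf_lt_length_of_mem hc
  refine List.mem_drop_iff_getElem.mpr ⟨l.idxOf c - (j+1), by omega, ?_⟩
  have : j + 1 + (l.idxOf c - (j + 1)) = l.idxOf c := by omega
  simp only [this]
  exact List.getElem_idxOf hlt

-- idxOf is injective on members with distinct values
lemma idxOf_ne_of_ne (l : List Int) (x c : Int) (hx : x ∈ l) (hc : c ∈ l) (hne : x ≠ c) :
    l.idxOf x ≠ l.idxOf c := by
  intro h
  apply hne
  have h1 := List.getElem_idxOf (List.idxOf_lt_length_of_mem hx)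
  have h2 := List.getElem_idxOf (List.idxOf_lt_length_of_mem hc)
  rw [← h1, ← h2]
  congr 1

lemma idxOf_append_self_of_not_mem (l : List Int) (x : Int) (h : x ∉ l) :
    (l ++ [x]).idxOf x = l.length := by
  induction l with
  | nil => simp
  | cons a l ih =>
    simp only [List.mem_cons, not_or] at h
    rw [List.cons_append, List.idxOf_cons_ne _ (by tauto)]
    simp [ih h.2]

-- the order of first occurrences is the order of PySem.Set.ofList
lemma idxOf_ofList_lt_iff (l : List Int) (x y : Int) (hx : x ∈ l) (hy : y ∈ l) :
    (PySem.Set.ofList l).idxOf x < (PySem.Set.ofList l).idxOf y ↔ l.idxOf x < l.idxOf y := by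
  induction l using List.reverseRecOn with
  | nil => simp at hx
  | append_singleton l a ih =>
    rw [PySem.Set.ofList_append_singleton, PySem.Set.add_eq_ite]
    by_cases hxl : x ∈ l <;> by_cases hyl : y ∈ l
    · have hx' : x ∈ PySem.Set.ofList l := by rw [PySem.Set.mem_ofList]; exact hxl
      have hy' : y ∈ PySem.Set.ofList l := by rw [PySem.Set.mem_ofList]; exact hyl
      rw [List.idxOf_append_of_mem hxl, List.idxOf_append_of_mem hyl]
      split
      · exact ih hxl hyl
      · rw [List.idxOf_append_of_mem hx', List.idxOf_append_of_mem hy']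
        exact ih hxl hyl
    · -- y = a, fresh
      have hya : y = a := by rcases List.mem_append.mp hy with h | h; exact absurd h hyl; simpa using h
      subst hya
      have hmem : ¬ y ∈ PySem.Set.ofList l := by rw [PySem.Set.mem_ofList]; exact hyl
      rw [if_neg hmem]
      have hx' : x ∈ PySem.Set.ofList l := by rw [PySem.Set.mem_ofList]; exact hxl
      rw [List.idxOf_append_of_mem hxl, List.idxOf_append_of_mem hx',
        idxOf_append_self_of_not_mem l y hyl, idxOf_append_self_of_not_mem _ y hmem]
      have h1 := List.idxOf_lt_length_of_mem hxl
      have h2 := List.idxOf_lt_length_of_mem hx'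
      constructor <;> intro <;> omega
    · -- x = a fresh, y ∈ l : both sides false
      have hxa : x = a := by rcases List.mem_append.mp hx with h | h; exact absurd h hxl; simpa using h
      subst hxa
      have hmem : ¬ x ∈ PySem.Set.ofList l := by rw [PySem.Set.mem_ofList]; exact hxl
      rw [if_neg hmem]
      have hy' : y ∈ PySem.Set.ofList l := by rw [PySem.Set.mem_ofList]; exact hyl
      rw [List.idxOf_append_of_mem hyl, List.idxOf_append_of_mem hy',
        idxOf_append_self_of_not_mem l x hxl, idxOf_append_self_of_not_mem _ x hmem]
      have h1 := List.idxOf_lt_length_of_mem hyl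
      have h2 := List.idxOf_lt_length_of_mem hy'
      constructor <;> intro <;> omega
    · -- both fresh: x = y = a
      have hxa : x = a := by rcases List.mem_append.mp hx with h | h; exact absurd h hxl; simpa using h
      have hya : y = a := by rcases List.mem_append.mp hy with h | h; exact absurd h hyl; simpa using h
      subst hxa; subst hya
      simp

-- min/max of a pair determine the pair up to swap
lemma eq_of_min_max (a b x c : Int) (h1 : min a b = min x c) (h2 : max a b = max x c) :
    (a = x ∧ b = c) ∨ (a = c ∧ b = x) := by
  rcases le_total a b with h | h <;> rcases le_total x c with h' | h' <;> omega

lemma sorted_pair (a b : Int) :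
    PySem.List.sorted [a, b] (fun x => x) false = [min a b, max a b] := by
  rcases le_total a b with h | h
  · rw [min_eq_left h, max_eq_right h]
    exact PySem.List.sorted_id_eq_of_perm_of_pairwise [a, b] [a, b] (List.Perm.refl _) (by simp [h])
  · rw [min_eq_right h, max_eq_left h]
    exact PySem.List.sorted_id_eq_of_perm_of_pairwise [a, b] [b, a] (List.Perm.swap _ _ _) (by simp [h])

-- what the members of refF look like
lemma mem_refF (nums : List Int) (target : Int) (j : Nat) (p : List Int) :
    p ∈ refF nums target j ↔ ∃ y ∈ PySem.Set.ofList (nums.take j), p ∈ pairOf nums target y := by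
  simp [refF, List.mem_flatMap]

-- A's one step realizes the transition refF j → refF (j+1)
lemma stepA_refF (nums : List Int) (target : Int) (j : Nat) (hj : j < nums.length) :
    stepA nums target (refF nums target j) (j : Int) = refF nums target (j + 1) := by
  have hx : PySem.List.pyGetD nums (j : Int) 0 = nums[j] := by
    simp [PySem.List.pyGetD_natCast, List.getD_eq_getElem?_getD, List.getElem?_eq_getElem hj]
  have hslice : PySem.List.slice nums (some ((j : Int) + 1)) none = nums.drop (j + 1) := by
    rw [PySem.List.slice_from nums (by omega)]
    have : ((j : Int) + 1).toNat = j + 1 := by omega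
    rw [this]
  set x := nums[j] with hxdef
  set c := target - x with hcdef
  have hxmem : x ∈ nums := List.getElem_mem hj
  have htake : nums.take (j + 1) = nums.take j ++ [x] := by
    rw [List.take_add_one, List.getElem?_eq_getElem hj]
    rfl
  have hdropj : nums.drop j = x :: nums.drop (j + 1) := List.drop_eq_getElem_cons hj
  have hsplit : nums.count x = (nums.take j).count x + (nums.drop j).count x := by
    conv_lhs => rw [(List.take_append_drop j nums).symm]
    exact List.count_append ..
  have hrefsucc : refF nums target (j + 1) =
      (PySem.Set.add (PySem.Set.ofList (nums.take j)) x).flatMap (pairOf nums target) := by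
    rw [refF, htake, PySem.Set.ofList_append_singleton]
  simp only [stepA, hx, ← hcdef, hslice, List.nil_append, List.singleton_append, sorted_pair]
  by_cases hmx : x ∈ nums.take j
  · -- not a first occurrence: both sides are refF j
    have hadd : PySem.Set.add (PySem.Set.ofList (nums.take j)) x = PySem.Set.ofList (nums.take j) :=
      PySem.Set.add_of_mem (by rw [PySem.Set.mem_ofList]; exact hmx)
    rw [hrefsucc, hadd, ← refF]
    by_cases hcs : c ∈ nums.drop (j + 1)
    · rw [if_pos hcs, if_pos]
      -- the pair is already present
      rw [mem_refF]
      by_cases hcx : c = x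
      · refine ⟨x, by rw [PySem.Set.mem_ofList]; exact hmx, ?_⟩
        have hcount : 2 ≤ (nums.count x : Int) := by
          have h1 : 1 ≤ (nums.take j).count x := List.one_le_count_iff.mpr hmx
          have h3 : (nums.drop j).count x = (nums.drop (j+1)).count x + 1 := by
            rw [hdropj]; simp
          omega
        simp [pairOf, ← hcdef, hcx, hcount]
      · have hcnums : c ∈ nums := List.mem_of_mem_drop hcs
        have hne := idxOf_ne_of_ne nums x c hxmem hcnums (fun h => hcx h.symm)
        by_cases hord : nums.idxOf x < nums.idxOf c
        · refine ⟨x, by rw [PySem.Set.mem_ofList]; exact hmx, ?_⟩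
          simp [pairOf, ← hcdef, hcx, hcnums, hord]
        · have hord' : nums.idxOf c < nums.idxOf x := by omega
          have hcj : c ∈ nums.take j := by
            rw [mem_take_iff_idxOf_lt nums c j hcnums]
            have := (mem_take_iff_idxOf_lt nums x j hxmem).mp hmx
            omega
          refine ⟨c, by rw [PySem.Set.mem_ofList]; exact hcj, ?_⟩
          have htc : target - c = x := by omega
          have hpc : pairOf nums target c = [[min x c, max x c]] := by
            simp only [pairOf, htc]
            rw [if_neg (show ¬ x = c from fun h => hcx h.symm), if_pos ⟨hxmem, hord'⟩,
              min_comm c x, max_comm c x]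
          rw [hpc]
          simp
    · rw [if_neg hcs]
  · -- first occurrence of x
    have hidx : nums.idxOf x = j := idxOf_eq_of_not_mem_take nums x j hj rfl hmx
    have hadd : PySem.Set.add (PySem.Set.ofList (nums.take j)) x =
        PySem.Set.ofList (nums.take j) ++ [x] :=
      PySem.Set.add_of_not_mem (by rw [PySem.Set.mem_ofList]; exact hmx)
    rw [hrefsucc, hadd, List.flatMap_append, ← refF]
    simp only [List.flatMap_cons, List.flatMap_nil, List.append_nil]
    by_cases hcs : c ∈ nums.drop (j + 1)
    · rw [if_pos hcs]
      by_cases hcx : c = x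
      · have hcount : 2 ≤ (nums.count x : Int) := by
          have h3 : (nums.drop j).count x = (nums.drop (j+1)).count x + 1 := by
            rw [hdropj]; simp
          have h4 : 1 ≤ (nums.drop (j+1)).count x := List.one_le_count_iff.mpr (hcx ▸ hcs)
          omega
        have hpx : pairOf nums target x = [[x, x]] := by
          simp [pairOf, ← hcdef, hcx, hcount]
        have hnotin : ¬ [min x c, max x c] ∈ refF nums target j := by
          rw [hcx]
          simp only [min_self, max_self]
          rw [mem_refF]
          rintro ⟨y, hy, hp⟩
          rw [PySem.Set.mem_ofList] at hy
          simp only [pairOf] at hp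
          split_ifs at hp with h1 h2 h3
          · simp at hp
            exact hmx (by rw [hp]; exact hy)
          · simp at hp
          · simp at hp
            obtain ⟨hp1, hp2⟩ := hp
            have : y = target - y := by omega
            exact h1 this.symm
          · simp at hp
        rw [if_neg hnotin, hpx, hcx]
        simp
      · have hcnums : c ∈ nums := List.mem_of_mem_drop hcs
        have hne := idxOf_ne_of_ne nums x c hxmem hcnums (fun h => hcx h.symm)
        by_cases hord : nums.idxOf x < nums.idxOf c
        · have hpx : pairOf nums target x = [[min x c, max x c]] := by
            simp [pairOf, ← hcdef, hcx, hcnums, hord]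
          have hnotin : ¬ [min x c, max x c] ∈ refF nums target j := by
            rw [mem_refF]
            rintro ⟨y, hy, hp⟩
            rw [PySem.Set.mem_ofList] at hy
            have hyj : nums.idxOf y < j := (mem_take_iff_idxOf_lt nums y j
              (List.mem_of_mem_take hy)).mp hy
            simp only [pairOf] at hp
            split_ifs at hp with h1 h2 h3
            · simp at hp
              obtain ⟨hp1, hp2⟩ := hp
              exact hcx (show x = c by omega).symm
            · simp at hp
            · simp at hp
              obtain ⟨hp1, hp2⟩ := hp
              rcases eq_of_min_max y (target - y) x c (by omega) (by omega) with ⟨h4, h5⟩ | ⟨h4, h5⟩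
              · subst h4
                omega
              · subst h4
                omega
            · simp at hp
          rw [if_neg hnotin, hpx]
        · have hord' : nums.idxOf c < nums.idxOf x := by omega
          have hcj : c ∈ nums.take j := by
            rw [mem_take_iff_idxOf_lt nums c j hcnums]
            omega
          have hnc : ¬ (c ∈ nums ∧ nums.idxOf x < nums.idxOf c) := by
            rintro ⟨-, h⟩
            omega
          have hpx : pairOf nums target x = [] := by
            simp [pairOf, ← hcdef, hcx, hnc]
          have hin : [min x c, max x c] ∈ refF nums target j := by
            rw [mem_refF]
            refine ⟨c, by rw [PySem.Set.mem_ofList]; exact hcj, ?_⟩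
            have htc : target - c = x := by omega
            have hpc : pairOf nums target c = [[min x c, max x c]] := by
              simp only [pairOf, htc]
              rw [if_neg (show ¬ x = c from fun h => hcx h.symm), if_pos ⟨hxmem, hord'⟩,
                min_comm c x, max_comm c x]
            rw [hpc]
            simp
          rw [if_pos hin, hpx]
          simp
    · rw [if_neg hcs]
      have hpx : pairOf nums target x = [] := by
        by_cases hcx : c = x
        · have hcount : nums.count x = 1 := by
            have h0 : (nums.take j).count x = 0 := List.count_eq_zero.mpr hmx
            have h1 : (nums.drop (j+1)).count x = 0 := List.count_eq_zero.mpr (hcx ▸ hcs)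
            have h3 : (nums.drop j).count x = (nums.drop (j+1)).count x + 1 := by
              rw [hdropj]; simp
            omega
          simp [pairOf, ← hcdef, hcx, hcount]
        · have hnc : ¬ (c ∈ nums ∧ nums.idxOf x < nums.idxOf c) := by
            rintro ⟨hcn, h⟩
            exact hcs (mem_drop_of_idxOf_gt nums c j hcn (hidx ▸ h))
          simp [pairOf, ← hcdef, hcx, hnc]
      rw [hpx]
      simp

-- the A loop from index a to b
lemma loopA (nums : List Int) (target : Int) :
    ∀ (k a : Nat), a + k ≤ nums.length →
    (PySem.List.pyRange (a : Int) ((a + k : Nat) : Int) 1).foldl (stepA nums target)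
      (refF nums target a) = refF nums target (a + k) := by
  intro k
  induction k with
  | zero => intro a _; simp [PySem.List.pyRange_one_eq_nil]
  | succ k ih =>
    intro a ha
    have h1 : ((a : Int)) < ((a + (k+1) : Nat) : Int) := by push_cast; omega
    rw [PySem.List.pyRange_one_cons h1, List.foldl_cons,
      stepA_refF nums target a (by omega)]
    have := ih (a + 1) (by omega)
    have hcast : ((a : Int) + 1) = ((a + 1 : Nat) : Int) := by push_cast; ring
    have hcast2 : ((a + (k+1) : Nat) : Int) = (((a+1) + k : Nat) : Int) := by push_cast; ring
    rw [hcast, hcast2, this]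
    congr 1
    omega

-- A computes refF at full length
lemma getsum2_eq_refF (nums : List Int) (target : Int) :
    getsum2 nums target = refF nums target nums.length := by
  unfold getsum2
  rcases Nat.eq_zero_or_pos nums.length with h0 | hpos
  · rw [PySem.List.pyRange_one_eq_nil (by simp [h0])]
    simp [refF, h0]
  · have hlen : PySem.List.len nums - 1 = ((nums.length - 1 : Nat) : Int) := by
      simp [PySem.List.len_eq]
      omega
    have h1 := loopA nums target (nums.length - 1) 0 (by omega)
    simp only [Nat.zero_add, Nat.cast_zero] at h1
    have hr0 : refF nums target 0 = [] := by simp [refF]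
    rw [hlen, ← hr0, h1]
    have h2 := stepA_refF nums target (nums.length - 1) (by omega)
    have hid : stepA nums target (refF nums target (nums.length - 1))
        ((nums.length - 1 : Nat) : Int) = refF nums target (nums.length - 1) := by
      simp only [stepA]
      rw [if_neg]
      rw [PySem.List.slice_from nums (by omega)]
      have : (((nums.length - 1 : Nat) : Int) + 1).toNat = nums.length := by omega
      rw [this]
      simp
    rw [← hid, h2]
    congr 1
    omega

lemma getsum2_alt_eq_refF (nums : List Int) (target : Int) :
    getsum2_alt nums target = refF nums target nums.length := by
  unfold getsum2_alt
  dsimp only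
  simp only [PySem.Dict.foldl_insert_getD_add_one_eq_counter, PySem.Dict.keys_counter]
  set K : List Int := PySem.Set.ofList nums with hK
  have hKnodup : K.Nodup := PySem.Set.nodup_ofList nums
  set order := (PySem.List.enumerate K 0).foldl
    (fun d (p : Int × Int) => d.insert p.2 p.1) PySem.Dict.empty with horder
  have hkeys : order.keys = K := by
    rw [horder, PySem.Dict.keys_foldl_insert_key, PySem.Dict.keys_empty,
      PySem.Set.update_nil_left, PySem.List.map_snd_enumerate,
      PySem.Set.ofList_eq_self_of_nodup K hKnodup]
  have hordnodup : order.keys.Nodup := by rw [hkeys]; exact hKnodup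
  have hitems : order.items = (PySem.List.enumerate K 0).map (fun p => (p.2, p.1)) := by
    rw [horder, PySem.Dict.items_foldl_insert_fresh]
    · simp [PySem.Dict.empty]
    · intro a _
      exact PySem.Dict.contains_empty _
    · rw [PySem.List.map_snd_enumerate]
      exact hKnodup
  have hgetD : ∀ v ∈ K, order.getD v 0 = ((K.idxOf v : Nat) : Int) := by
    intro v hv
    refine PySem.Dict.getD_of_mem_items _ ?_ hordnodup 0
    rw [hitems, List.mem_map]
    refine ⟨(((K.idxOf v : Nat) : Int), v), ?_, rfl⟩
    rw [PySem.List.mem_enumerate_iff]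
    exact ⟨K.idxOf v, List.idxOf_lt_length_of_mem hv,
      by rw [List.getElem_idxOf (List.idxOf_lt_length_of_mem hv)]; simp⟩
  have hcontains : ∀ v : Int, order.contains v = decide (v ∈ nums) := by
    intro v
    rw [PySem.Dict.contains_eq_decide_mem_keys, hkeys]
    simp [hK, PySem.Set.mem_ofList]
  have hbody : (fun (out : List (List Int)) (x : Int) =>
      if target - x == x then
        (if 2 ≤ (PySem.Dict.counter nums).getD x 0 then out ++ [[x, x]] else out)
      else if order.contains (target - x) && decide (order.getD x 0 < order.getD (target - x) 0) then
        out ++ [if x < target - x then [x, target - x] else [target - x, x]]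
      else out)
      = (fun out x => out ++
          (if target - x == x then
            (if 2 ≤ (PySem.Dict.counter nums).getD x 0 then [[x, x]] else [])
          else if order.contains (target - x) && decide (order.getD x 0 < order.getD (target - x) 0) then
            [if x < target - x then [x, target - x] else [target - x, x]]
          else [])) := by
    funext out x
    split_ifs <;> simp
  refine Eq.trans (congrArg (fun f => List.foldl f ([] : List (List Int)) K) hbody) ?_
  dsimp only
  rw [PySem.List.foldl_append_eq_flatMap]
  rw [List.nil_append, refF, List.take_length, ← hK]
  apply List.flatMap_congr
  intro x hxK
  have hxnums : x ∈ nums := by rwa [hK, PySem.Set.mem_ofList] at hxK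
  simp only [pairOf, beq_iff_eq, PySem.Dict.getD_counter]
  by_cases hcx : target - x = x
  · simp [hcx]
  · rw [if_neg hcx, if_neg hcx]
    by_cases hcn : target - x ∈ nums
    · have hcK : target - x ∈ K := by rw [hK, PySem.Set.mem_ofList]; exact hcn
      by_cases hord : nums.idxOf x < nums.idxOf (target - x)
      · have hKord : K.idxOf x < K.idxOf (target - x) :=
          (idxOf_ofList_lt_iff nums x (target - x) hxnums hcn).mpr hord
        have hb1 : (order.contains (target - x) &&
            decide (order.getD x 0 < order.getD (target - x) 0)) = true := by
          rw [hcontains, hgetD x hxK, hgetD _ hcK]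
          simp [hcn, hKord]
        rw [if_pos hb1, if_pos (show target - x ∈ nums ∧
          nums.idxOf x < nums.idxOf (target - x) from ⟨hcn, hord⟩)]
        rcases lt_trichotomy x (target - x) with h | h | h
        · rw [if_pos h, min_eq_left h.le, max_eq_right h.le]
        · exact absurd h.symm hcx
        · rw [if_neg (not_lt.mpr h.le), min_eq_right h.le, max_eq_left h.le]
      · have hKord : ¬ K.idxOf x < K.idxOf (target - x) := fun hh =>
          hord ((idxOf_ofList_lt_iff nums x (target - x) hxnums hcn).mp hh)
        have hb1 : ¬ ((order.contains (target - x) &&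
            decide (order.getD x 0 < order.getD (target - x) 0)) = true) := by
          rw [hcontains, hgetD x hxK, hgetD _ hcK]
          simp [hKord]
        rw [if_neg hb1, if_neg (show ¬ (target - x ∈ nums ∧
          nums.idxOf x < nums.idxOf (target - x)) from fun hh => hord hh.2)]
    · have hb1 : ¬ ((order.contains (target - x) &&
          decide (order.getD x 0 < order.getD (target - x) 0)) = true) := by
        simp [hcontains, hcn]
      rw [if_neg hb1, if_neg (show ¬ (target - x ∈ nums ∧
        nums.idxOf x < nums.idxOf (target - x)) from fun hh => hcn hh.1)]

-- ===== VERDICT (by name: the statement is the Claim_ definition above) =====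
theorem getsum2_spec : Claim_equal_getsum2 := by
  intro nums target _
  unfold Spec_getsum2
  rw [getsum2_eq_refF, getsum2_alt_eq_refF]
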